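-- pv_equiv track=rewrite | github.com/SanjinDedic/time_capsule | main.py | combine_keys
-- ===== SOURCE A (Python) =====
-- def combine_keys(user_key, my_key):
--     combined_key = ""
--     # Iterate over the length of the longer key
--     for i in range(max(len(user_key), len(my_key))):
--         if i < len(user_key):
--             combined_key += user_key[i].upper()  # Add character from user key
--         if i < len(my_key):
--             combined_key += my_key[i].upper()    # Add character from your key
--     return combined_key
-- ===== SOURCE B (Python) =====
-- def combine_keys(user_key, my_key):
--     # Stage 1: uppercase both keys in full, once.
--     u = user_key.upper()
--     m = my_key.upper()
--     # Stage 2: interleave only the common prefix (no bound checks needed).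
--     n = min(len(u), len(m))
--     head = "".join(u[i] + m[i] for i in range(n))
--     # Stage 3: whichever key is longer contributes its tail unchanged.
--     return head + u[n:] + m[n:]
-- ===== Notes on version B (the rewrite author's own statement) =====
-- stated objective: alternative
-- what changed: Instead of one loop to max(len,len) with two per-iteration bound checks and per-character upper plus += concatenation, B works in stages: uppercase both strings once, interleave only the common prefix of length min(len,len), then append the longer key's leftover tail via slicing.
import Mathlib
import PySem

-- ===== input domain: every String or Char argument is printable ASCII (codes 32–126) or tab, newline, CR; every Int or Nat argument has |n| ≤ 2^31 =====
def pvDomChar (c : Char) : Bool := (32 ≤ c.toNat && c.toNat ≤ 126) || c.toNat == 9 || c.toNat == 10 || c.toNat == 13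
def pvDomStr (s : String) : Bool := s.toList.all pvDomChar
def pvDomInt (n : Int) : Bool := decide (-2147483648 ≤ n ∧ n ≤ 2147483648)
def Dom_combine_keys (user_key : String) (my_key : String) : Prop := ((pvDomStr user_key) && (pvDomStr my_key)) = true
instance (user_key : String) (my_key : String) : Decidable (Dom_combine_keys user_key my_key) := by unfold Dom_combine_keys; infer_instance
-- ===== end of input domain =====

-- B restructures A's single max-length loop with bound checks into stages: upper both keys once,
-- interleave only the common prefix (min length), append the longer key's tail (alternative; same cost).

-- ===== PORT A =====
-- index loop: for i in range(max(len u, len m)): append u[i].upper() / m[i].upper() when in range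
def combine_keys (user_key : String) (my_key : String) : String :=
  String.mk <|
    (PySem.List.pyRange 0 (max (user_key.toList.length : Int) (my_key.toList.length : Int)) 1).foldl
      (fun acc i =>
        let acc := if i < (user_key.toList.length : Int)
          then acc ++ PySem.Chars.upper [PySem.List.pyGetD user_key.toList i ' '] else acc
        if i < (my_key.toList.length : Int)
          then acc ++ PySem.Chars.upper [PySem.List.pyGetD my_key.toList i ' '] else acc)
      []

-- ===== PORT B =====
-- u = user_key.upper(); m = my_key.upper(); n = min(len u, len m);
-- "".join(u[i] + m[i] for i in range(n)) + u[n:] + m[n:]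
def combine_keys_alt (user_key : String) (my_key : String) : String :=
  let u := PySem.Chars.upper user_key.toList
  let m := PySem.Chars.upper my_key.toList
  let n := min u.length m.length
  String.mk <|
    ((PySem.List.pyRange 0 (n : Int) 1).map
        (fun i => [PySem.List.pyGetD u i ' ', PySem.List.pyGetD m i ' '])).flatten
      ++ PySem.List.slice u (some (n : Int)) none
      ++ PySem.List.slice m (some (n : Int)) none

-- ===== PRECONDITION & SPEC =====
def Spec_combine_keys (user_key : String) (my_key : String) (out : String) : Prop := out = combine_keys_alt user_key my_key
instance (user_key : String) (my_key : String) (out : String) : Decidable (Spec_combine_keys user_key my_key out) := by unfold Spec_combine_keys; infer_instance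

-- ===== CLAIM (what is proved, stated in full; the proofs are below) =====
def Claim_equal_combine_keys : Prop := ∀ (user_key : String) (my_key : String), Dom_combine_keys user_key my_key → Spec_combine_keys user_key my_key (combine_keys user_key my_key)

-- ===== LEMMAS AND PROOFS =====

-- proof-side normal form of the interleaving
def pvInterleaveUp : List Char → List Char → List Char
  | [], ys => ys.map PySem.Chars.upperChar
  | x :: xs, [] => PySem.Chars.upperChar x :: (xs.map PySem.Chars.upperChar)
  | x :: xs, y :: ys => PySem.Chars.upperChar x :: PySem.Chars.upperChar y :: pvInterleaveUp xs ys

-- the per-index contribution of A's loop body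
def pvContrib (xs ys : List Char) (k : Nat) : List Char :=
  (if k < xs.length then PySem.Chars.upper [xs.getD k ' '] else [])
    ++ (if k < ys.length then PySem.Chars.upper [ys.getD k ' '] else [])

theorem pvContrib_succ (x y : Char) (xs ys : List Char) (k : Nat) :
    pvContrib (x :: xs) (y :: ys) (k + 1) = pvContrib xs ys k := by
  simp [pvContrib]

theorem pvFlatMap_contrib (xs ys : List Char) :
    (List.range (max xs.length ys.length)).flatMap (pvContrib xs ys) = pvInterleaveUp xs ys := by
  induction xs generalizing ys with
  | nil =>
    simp only [pvInterleaveUp, List.length_nil, Nat.zero_max]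
    induction ys with
    | nil => simp
    | cons y ys ih =>
      simp only [List.length_cons]
      rw [List.range_succ_eq_map]
      simp only [List.flatMap_cons, List.flatMap_map]
      have : ∀ k, pvContrib [] (y :: ys) (k + 1) = pvContrib [] ys k := by
        intro k; simp [pvContrib]
      simp only [this]
      rw [show (fun k => pvContrib ([] : List Char) ys k) = pvContrib [] ys from rfl, ih]
      simp [pvContrib, PySem.Chars.upper]
  | cons x xs ihx =>
    cases ys with
    | nil =>
      simp only [pvInterleaveUp, List.length_cons, List.length_nil, Nat.max_zero]
      rw [List.range_succ_eq_map]
      simp only [List.flatMap_cons, List.flatMap_map]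
      have h1 : ∀ k, pvContrib (x :: xs) [] (k + 1) = pvContrib xs [] k := by
        intro k; simp [pvContrib]
      simp only [h1]
      have := ihx ([] : List Char)
      simp only [List.length_nil, Nat.max_zero] at this
      rw [show (fun k => pvContrib xs [] k) = pvContrib xs [] from rfl, this]
      cases xs with
      | nil => simp [pvContrib, pvInterleaveUp, PySem.Chars.upper]
      | cons a as => simp [pvContrib, pvInterleaveUp, PySem.Chars.upper]
    | cons y ys =>
      simp only [pvInterleaveUp, List.length_cons]
      rw [show max (xs.length + 1) (ys.length + 1) = max xs.length ys.length + 1 by omega]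
      rw [List.range_succ_eq_map]
      simp only [List.flatMap_cons, List.flatMap_map]
      simp only [pvContrib_succ]
      rw [show (fun k => pvContrib xs ys k) = pvContrib xs ys from rfl, ihx]
      simp [pvContrib, PySem.Chars.upper]

-- B's staged form equals the interleaving normal form
theorem pvInterleave_eq_staged (xs ys : List Char) :
    pvInterleaveUp xs ys =
      ((List.range (min xs.length ys.length)).map
          (fun i => [(PySem.Chars.upper xs).getD i ' ', (PySem.Chars.upper ys).getD i ' '])).flatten
        ++ (PySem.Chars.upper xs).drop (min xs.length ys.length)
        ++ (PySem.Chars.upper ys).drop (min xs.length ys.length) := by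
  induction xs generalizing ys with
  | nil => simp [pvInterleaveUp, PySem.Chars.upper]
  | cons x xs ihx =>
    cases ys with
    | nil => simp [pvInterleaveUp, PySem.Chars.upper]
    | cons y ys =>
      simp only [List.length_cons]
      rw [show min (xs.length + 1) (ys.length + 1) = min xs.length ys.length + 1 by omega]
      rw [List.range_succ_eq_map]
      simp only [pvInterleaveUp, List.map_cons, List.map_map, List.flatten_cons]
      have hu : PySem.Chars.upper (x :: xs) = PySem.Chars.upperChar x :: PySem.Chars.upper xs := by
        simp [PySem.Chars.upper]
      have hm : PySem.Chars.upper (y :: ys) = PySem.Chars.upperChar y :: PySem.Chars.upper ys := by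
        simp [PySem.Chars.upper]
      rw [hu, hm]
      simp only [List.getD_cons_zero, List.drop_succ_cons, Function.comp_def,
        List.getD_cons_succ]
      rw [ihx ys]
      simp

-- ===== VERDICT (by name: the statement is the Claim_ definition above) =====
theorem combine_keys_spec : Claim_equal_combine_keys := by
  intro u m _
  show combine_keys u m = combine_keys_alt u m
  unfold combine_keys combine_keys_alt
  generalize u.toList = ul
  generalize m.toList = ml
  -- A side: loop = flatMap of the per-index contribution
  have hmax : max (ul.length : Int) (ml.length : Int) = ((max ul.length ml.length : Nat) : Int) := by
    omega
  rw [hmax, PySem.List.pyRange_zero_natCast]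
  rw [List.foldl_map]
  have hcongr :
      (List.range (max ul.length ml.length)).foldl
        (fun acc (k : Nat) =>
          let acc := if ((k : Int)) < (ul.length : Int)
            then acc ++ PySem.Chars.upper [PySem.List.pyGetD ul (k : Int) ' '] else acc
          if ((k : Int)) < (ml.length : Int)
            then acc ++ PySem.Chars.upper [PySem.List.pyGetD ml (k : Int) ' '] else acc) []
      = (List.range (max ul.length ml.length)).foldl
          (fun acc k => acc ++ pvContrib ul ml k) [] := by
    apply PySem.List.foldl_congr_mem
    intro acc k _
    simp only [pvContrib, PySem.List.pyGetD_natCast, Nat.cast_lt]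
    by_cases h1 : k < ul.length <;> by_cases h2 : k < ml.length <;>
      simp [h1, h2]
  rw [hcongr, PySem.List.foldl_append_eq_flatMap, List.nil_append, pvFlatMap_contrib]
  -- B side: normalize pyRange / pyGetD / slice, then apply the staged lemma
  rw [pvInterleave_eq_staged]
  have hlen : min (PySem.Chars.upper ul).length (PySem.Chars.upper ml).length
      = min ul.length ml.length := by
    simp [PySem.Chars.upper]
  simp only [PySem.List.pyRange_zero_natCast, List.map_map, Function.comp_def,
    PySem.List.slice_from_natCast, PySem.List.pyGetD_natCast, hlen]
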